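-- pv_equiv track=rewrite | github.com/Grasseh/adventofcode-2017 | solvers/day06a.py | redistribute
-- ===== SOURCE A (Python) =====
-- def redistribute(banks):
--     highest_bank = banks.index(max(banks))
--     value_to_redistribute = banks[highest_bank]
--     banks[highest_bank] = 0
--     for i in range(0, value_to_redistribute):
--         j = (highest_bank + i + 1) % len(banks)
--         banks[j] += 1
--     return banks
-- ===== SOURCE B (Python) =====
-- def redistribute(banks):
--     n = len(banks)
--     i = banks.index(max(banks))
--     v = banks[i]
--     banks[i] = 0
--     if v > 0:
--         q, r = divmod(v, n)
--         banks[:] = [b + q + (1 if (j - i - 1) % n < r else 0)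
--                     for j, b in enumerate(banks)]
--     return banks
-- ===== Notes on version B (the rewrite author's own statement) =====
-- stated objective: faster
-- what changed: A hands out the max bank's blocks one at a time in an O(value) loop; B computes each bank's share in closed form with divmod (everyone gets value//n, the next value%n banks after the max get one extra), in O(n).
import Mathlib
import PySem

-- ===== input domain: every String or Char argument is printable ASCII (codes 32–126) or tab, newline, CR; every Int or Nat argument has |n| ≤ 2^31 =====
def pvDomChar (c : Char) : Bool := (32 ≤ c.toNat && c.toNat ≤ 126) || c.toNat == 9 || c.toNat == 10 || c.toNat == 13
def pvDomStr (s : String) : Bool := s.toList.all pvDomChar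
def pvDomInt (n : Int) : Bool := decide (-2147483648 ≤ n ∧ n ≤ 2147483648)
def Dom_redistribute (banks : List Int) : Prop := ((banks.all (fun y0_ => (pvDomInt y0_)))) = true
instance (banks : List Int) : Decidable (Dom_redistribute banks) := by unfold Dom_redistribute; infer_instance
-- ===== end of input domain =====

-- B replaces A's one-block-at-a-time loop (O(max value) steps) by a closed-form divmod distribution (O(n));
-- both A and B mutate the argument list in Python — the theorems here are about the return value only.

-- ===== PORT A =====
def redistribute (banks : List Int) : List Int :=
  match PySem.List.max? banks (fun y => y) with
  | none => banks            -- unreachable under Pre_ (max([]) raises ValueError)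
  | some mx =>
    match PySem.List.index? banks mx with
    | none => banks          -- unreachable: the max is a member
    | some highest =>
      let v := PySem.List.pyGetD banks (highest : Int) 0
      (PySem.List.pyRange 0 v 1).foldl
        (fun b i =>
          let j := PySem.Int.mod ((highest : Int) + i + 1) ((b.length : Int))
          PySem.List.pySetD b j (PySem.List.pyGetD b j 0 + 1))
        (PySem.List.pySetD banks (highest : Int) 0)

-- ===== PORT B =====
def redistribute_alt (banks : List Int) : List Int :=
  let n : Int := (banks.length : Int)
  match PySem.List.max? banks (fun y => y) with
  | none => banks            -- unreachable under Pre_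
  | some mx =>
    match PySem.List.index? banks mx with
    | none => banks          -- unreachable
    | some i =>
      let v := PySem.List.pyGetD banks (i : Int) 0
      let zeroed := PySem.List.pySetD banks (i : Int) 0
      if v > 0 then
        let q := PySem.Int.floordiv v n
        let r := PySem.Int.mod v n
        (PySem.List.enumerate zeroed 0).map
          (fun jb => jb.2 + q + (if PySem.Int.mod (jb.1 - (i : Int) - 1) n < r then 1 else 0))
      else zeroed

-- ===== PRECONDITION & SPEC =====
-- Pre_ excludes only the empty list, on which A raises ValueError (max of empty sequence).
def Pre_redistribute (banks : List Int) : Prop := banks ≠ []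
instance (banks : List Int) : Decidable (Pre_redistribute banks) := by unfold Pre_redistribute; infer_instance
def pvWitness_redistribute : List Int := [0, 2, 7, 0]

def Spec_redistribute (banks : List Int) (out : List Int) : Prop := out = redistribute_alt banks
instance (banks : List Int) (out : List Int) : Decidable (Spec_redistribute banks out) := by unfold Spec_redistribute; infer_instance

-- ===== CLAIM (what is proved, stated in full; the proofs are below) =====
def Claim_equal_redistribute : Prop := ∀ (banks : List Int), Dom_redistribute banks → Pre_redistribute banks → Spec_redistribute banks (redistribute banks)

-- ===== LEMMAS AND PROOFS =====

-- x % n for x in [0, 2n)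
lemma mod_window (n x : Nat) (_hn : 0 < n) (hx : x < 2 * n) :
    x % n = if x < n then x else x - n := by
  split
  · exact Nat.mod_eq_of_lt (by omega)
  · rw [Nat.mod_eq_sub_mod (by omega)]
    exact Nat.mod_eq_of_lt (by omega)

-- successor division/modulus facts
lemma succ_divmod (n m : Nat) (hn : 0 < n) :
    (if m % n + 1 = n then (m + 1) / n = m / n + 1 ∧ (m + 1) % n = 0
     else (m + 1) / n = m / n ∧ (m + 1) % n = m % n + 1) := by
  have key : m + 1 = (m % n + 1) + n * (m / n) := by
    have := Nat.div_add_mod m n; omega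
  split
  · next h =>
    have hk : m + 1 = (m / n + 1) * n := by rw [key, h]; ring
    constructor
    · rw [hk, Nat.mul_div_cancel _ hn]
    · rw [hk, Nat.mul_mod_left]
  · next h =>
    have hlt : m % n + 1 < n := by have := Nat.mod_lt m hn; omega
    constructor
    · rw [key, Nat.add_mul_div_left _ _ hn, Nat.div_eq_of_lt hlt, Nat.zero_add]
    · rw [key, Nat.add_mul_mod_self_left, Nat.mod_eq_of_lt hlt]

-- the per-step count delta: one more block lands at position (t + m) % n
lemma cnt_delta (n t m j : Nat) (hn : 0 < n) (hj : j < n) (ht : t < n) :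
    (m + 1) / n + (if (j + n - t) % n < (m + 1) % n then 1 else 0)
      = m / n + (if (j + n - t) % n < m % n then 1 else 0)
        + (if j = (t + m) % n then 1 else 0) := by
  have hr : m % n < n := Nat.mod_lt m hn
  have ha := mod_window n (j + n - t) hn (by omega)
  have hp1 : (t + m) % n = (t + m % n) % n := by
    conv_lhs => rw [Nat.add_mod]
    conv_rhs => rw [Nat.add_mod, Nat.mod_mod_of_dvd _ dvd_rfl]
  have hp2 := mod_window n (t + m % n) hn (by omega)
  have hd := succ_divmod n m hn
  rw [hp1, hp2] at *
  split at hd <;> rw [hd.1, hd.2] <;> rw [ha] <;> split_ifs <;> omega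

-- cast bridge: Python's (k - hi - 1) % n as a Nat expression, for 0 ≤ k < n
lemma mod_shift (n hi k : Nat) (hn : 0 < n) :
    PySem.Int.mod ((k : Int) - (hi : Int) - 1) (n : Int)
      = (((k + n - (hi + 1) % n) % n : Nat) : Int) := by
  rw [PySem.Int.mod_eq_emod_of_pos (by exact_mod_cast hn : (0:Int) < (n:Int))]
  set t := (hi + 1) % n with htdef
  set c := (hi + 1) / n with hcdef
  have ht : t < n := Nat.mod_lt _ hn
  have key : ((k : Int) - hi - 1) = ((k + n - t : Nat) : Int) + (n : Int) * (-((c : Int) + 1)) := by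
    rw [Nat.cast_sub (show t ≤ k + n by omega)]
    have hcast : ((hi : Int) + 1) = (n : Int) * c + t := by
      exact_mod_cast (Nat.div_add_mod (hi + 1) n).symm
    push_cast
    linarith [hcast]
  rw [key, Int.add_mul_emod_self_left]
  norm_cast

-- cast bridge for A's index: (hi + m + 1) % n on Int equals the Nat mod
lemma mod_castA (n hi m : Nat) (hn : 0 < n) :
    PySem.Int.mod ((hi : Int) + (m : Int) + 1) (n : Int) = (((hi + m + 1) % n : Nat) : Int) := by
  rw [PySem.Int.mod_eq_emod_of_pos (by exact_mod_cast hn : (0:Int) < (n:Int))]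
  have h : ((hi : Int) + m + 1) = ((hi + m + 1 : Nat) : Int) := by push_cast; ring
  rw [h]
  norm_cast

-- A's one-by-one loop computes the closed-form counts
lemma loopA_eq (n hi : Nat) (hn : 0 < n) (_hhi : hi < n) :
    ∀ (m : Nat) (l : List Int), l.length = n →
    (List.range m).foldl
      (fun b (k : Nat) =>
        PySem.List.pySetD b (PySem.Int.mod ((hi : Int) + (k : Int) + 1) ((b.length : Int)))
          (PySem.List.pyGetD b (PySem.Int.mod ((hi : Int) + (k : Int) + 1) ((b.length : Int))) 0 + 1)) l
    = l.mapIdx (fun j b => b + ((m / n : Nat) : Int)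
        + (if (j + n - (hi + 1) % n) % n < m % n then 1 else 0)) := by
  intro m
  induction m with
  | zero =>
    intro l hl
    simp only [List.range_zero, List.foldl_nil, Nat.zero_div, Nat.zero_mod,
      Nat.cast_zero, Nat.not_lt_zero, if_false, add_zero]
    apply List.ext_getElem (by simp)
    intro j h1 h2
    simp
  | succ m ih =>
    intro l hl
    rw [List.range_succ, List.foldl_append, List.foldl_cons, List.foldl_nil, ih l hl]
    set S := l.mapIdx (fun j b => b + ((m / n : Nat) : Int)
        + (if (j + n - (hi + 1) % n) % n < m % n then 1 else 0)) with hS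
    have hSl : S.length = n := by simp [hS, hl]
    have hp : (hi + m + 1) % n < n := Nat.mod_lt _ hn
    rw [hSl, mod_castA n hi m hn, PySem.List.pySetD_natCast,
      PySem.List.pyGetD_ofNat S ((hi + m + 1) % n) 0 (by omega)]
    have hSj : ∀ (j' : Nat) (h : j' < n), S[j']'(by omega)
        = l[j']'(by omega) + ((m / n : Nat) : Int)
          + (if (j' + n - (hi + 1) % n) % n < m % n then 1 else 0) := by
      intro j' h
      simp [hS]
    rw [hSj ((hi + m + 1) % n) hp]
    apply List.ext_getElem (by simp [hS, hl])
    intro j hj1 hj2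
    have hjn : j < n := by simpa [hl] using hj2
    rw [List.getElem_mapIdx, List.getElem_set]
    have heq : (hi + m + 1) % n = ((hi + 1) % n + m) % n := by
      conv_lhs => rw [show hi + m + 1 = (hi + 1) + m by omega, Nat.add_mod]
      conv_rhs => rw [Nat.add_mod, Nat.mod_mod_of_dvd _ dvd_rfl]
    have hdelta := cnt_delta n ((hi + 1) % n) m j hn hjn (Nat.mod_lt _ hn)
    rw [← heq] at hdelta
    have hcast1 : ∀ (c : Prop) [Decidable c], (if c then (1 : Int) else 0) = (((if c then 1 else 0) : Nat) : Int) := by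
      intro c _
      split_ifs <;> simp
    by_cases hje : (hi + m + 1) % n = j
    · subst hje
      rw [if_pos rfl]
      rw [if_pos rfl] at hdelta
      simp only [hcast1]
      omega
    · rw [if_neg hje]
      rw [hSj j hjn]
      rw [if_neg (by omega : ¬ j = (hi + m + 1) % n), add_zero] at hdelta
      simp only [hcast1]
      omega

-- B's enumerate/map computes the same closed-form counts
lemma altB_eq (n hi V : Nat) (hn : 0 < n) (_hhi : hi < n) (l : List Int) (hl : l.length = n) :
    (PySem.List.enumerate l 0).map
      (fun jb => jb.2 + ((V / n : Nat) : Int)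
        + (if PySem.Int.mod (jb.1 - (hi : Int) - 1) (n : Int) < ((V % n : Nat) : Int) then 1 else 0))
    = l.mapIdx (fun j b => b + ((V / n : Nat) : Int)
        + (if (j + n - (hi + 1) % n) % n < V % n then 1 else 0)) := by
  apply List.ext_getElem (by simp [PySem.List.length_enumerate, hl])
  intro k h1 h2
  have hk : k < n := by simpa [hl] using h2
  rw [List.getElem_map, PySem.List.getElem_enumerate, List.getElem_mapIdx]
  simp only [zero_add]
  rw [mod_shift n hi k hn]
  norm_cast

-- ===== VERDICT (by name: the statement is the Claim_ definition above) =====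
theorem redistribute_spec : Claim_equal_redistribute := by
  intro banks _ hpre
  unfold Spec_redistribute redistribute redistribute_alt
  cases hmax : PySem.List.max? banks (fun y => y) with
  | none => exact absurd ((PySem.List.max?_eq_none_iff _ _).mp hmax) hpre
  | some mx =>
    have hmem : mx ∈ banks := PySem.List.max?_mem hmax
    dsimp only
    cases hidx : PySem.List.index? banks mx with
    | none => exact absurd ((PySem.List.index?_eq_none_iff _ _).mp hidx) (by simpa using hmem)
    | some hi =>
      obtain ⟨hhi, -, -⟩ := PySem.List.getElem_of_index?_eq_some hidx
      have hn : 0 < banks.length := by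
        cases banks with
        | nil => exact absurd rfl hpre
        | cons a t => simp
      dsimp only
      set v := PySem.List.pyGetD banks (hi : Int) 0 with hv
      have hl0len : (PySem.List.pySetD banks (hi : Int) 0).length = banks.length := by
        rw [PySem.List.pySetD_natCast]
        simp
      by_cases hvp : v > 0
      · rw [if_pos hvp]
        have hV : v = ((v.toNat : Nat) : Int) := by omega
        rw [show PySem.Int.floordiv v ((banks.length : Nat) : Int)
              = ((v.toNat / banks.length : Nat) : Int) by
            rw [hV]; exact_mod_cast PySem.Int.floordiv_natCast v.toNat banks.length]
        rw [show PySem.Int.mod v ((banks.length : Nat) : Int)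
              = ((v.toNat % banks.length : Nat) : Int) by
            rw [hV]; exact_mod_cast PySem.Int.mod_natCast v.toNat banks.length]
        rw [altB_eq banks.length hi v.toNat hn hhi _ hl0len]
        rw [show PySem.List.pyRange 0 v = (List.range v.toNat).map (fun k => ((k : Nat) : Int)) by
            rw [PySem.List.pyRange_one]; simp]
        rw [List.foldl_map]
        exact loopA_eq banks.length hi hn hhi v.toNat _ hl0len
      · rw [if_neg hvp, PySem.List.pyRange_one_eq_nil (show v ≤ 0 by omega)]
        rfl
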